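-- pv_equiv track=rewrite | github.com/KarrXie/interview_code | search.py | factor_seg
-- ===== SOURCE A (Python) =====
-- def factor_seg(x,m,n):
--     rst=0
--     for k in range(1,m+1):
--         if x//k>=n:
--             rst+=n
--         else:
--             rst+=x//k
--     return rst
-- ===== SOURCE B (Python) =====
-- def factor_seg(x, m, n):
--     # Divisor-block (hyperbola) summation: sum of min(x//k, n) over k=1..m,
--     # processing maximal runs of equal quotient x//k in one step.
--     rst = 0
--     k = 1
--     while k <= m:
--         q = x // k
--         if q > 0:
--             end = x // q          # last j with x//j == q (x > 0 here)
--         elif q >= -1: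
--             end = m               # quotient 0 (x >= 0) or -1 (x < 0) persists
--         else:
--             end = (-x - 1) // (-q - 1)   # last j with x//j == q for q <= -2
--         if end > m:
--             end = m
--         rst += (n if q >= n else q) * (end - k + 1)
--         k = end + 1
--     return rst
-- ===== Notes on version B (the rewrite author's own statement) =====
-- stated objective: faster
-- what changed: Replaces the k=1..m loop by divisor-block (hyperbola) summation: maximal runs of k with equal quotient x//k are summed in one step, with closed-form block ends for positive, zero/-1 and <= -2 quotients.
import Mathlib
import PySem

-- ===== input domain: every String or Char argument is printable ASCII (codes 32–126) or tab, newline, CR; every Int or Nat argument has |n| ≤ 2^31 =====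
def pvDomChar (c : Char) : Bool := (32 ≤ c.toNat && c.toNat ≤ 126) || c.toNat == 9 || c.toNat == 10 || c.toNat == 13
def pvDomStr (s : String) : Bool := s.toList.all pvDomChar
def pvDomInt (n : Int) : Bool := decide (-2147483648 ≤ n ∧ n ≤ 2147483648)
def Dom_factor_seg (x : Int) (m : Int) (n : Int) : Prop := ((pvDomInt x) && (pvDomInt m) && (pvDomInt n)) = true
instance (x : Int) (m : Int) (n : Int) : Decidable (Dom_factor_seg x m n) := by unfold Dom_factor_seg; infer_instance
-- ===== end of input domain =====

-- B replaces A's k = 1..m loop by divisor-block (hyperbola) summation — same value, fewer iterations.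

-- ===== PORT A =====
def factor_seg (x : Int) (m : Int) (n : Int) : Int :=
  (PySem.List.pyRange 1 (m + 1) 1).foldl
    (fun rst k => if PySem.Int.floordiv x k ≥ n then rst + n else rst + PySem.Int.floordiv x k) 0

-- ===== PORT B =====
-- while-loop of Source B as fuel recursion (fuel = m.toNat suffices: k advances by each block's length)
def altLoop (x n m : Int) (k : Int) (fuel : Nat) (acc : Int) : Int :=
  match fuel with
  | 0 => acc
  | Nat.succ f =>
    if k ≤ m then
      let q := PySem.Int.floordiv x k
      let e0 : Int :=
        if q > 0 then PySem.Int.floordiv x q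
        else if q ≥ -1 then m
        else PySem.Int.floordiv (-x - 1) (-q - 1)
      let e := if e0 > m then m else e0
      altLoop x n m (e + 1) (f - (e - k).toNat) (acc + (if q ≥ n then n else q) * (e - k + 1))
    else acc
termination_by fuel
decreasing_by omega

def factor_seg_alt (x : Int) (m : Int) (n : Int) : Int :=
  altLoop x n m 1 m.toNat 0

-- ===== PRECONDITION & SPEC =====
def Spec_factor_seg (x : Int) (m : Int) (n : Int) (out : Int) : Prop := out = factor_seg_alt x m n
instance (x : Int) (m : Int) (n : Int) (out : Int) : Decidable (Spec_factor_seg x m n out) := by unfold Spec_factor_seg; infer_instance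

-- ===== CLAIM (what is proved, stated in full; the proofs are below) =====
def Claim_equal_factor_seg : Prop := ∀ (x : Int) (m : Int) (n : Int), Dom_factor_seg x m n → Spec_factor_seg x m n (factor_seg x m n)

-- ===== LEMMAS AND PROOFS =====

-- one summand of A's loop
def gfun (x n j : Int) : Int :=
  if PySem.Int.floordiv x j ≥ n then n else PySem.Int.floordiv x j

-- reference sum: gfun x n k + gfun x n (k+1) + … (c terms)
def refSum (x n : Int) (k : Int) (c : Nat) : Int :=
  match c with
  | 0 => 0
  | Nat.succ c => gfun x n k + refSum x n (k + 1) c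

theorem refSum_split (x n : Int) (k : Int) (c1 c2 : Nat) :
    refSum x n k (c1 + c2) = refSum x n k c1 + refSum x n (k + (c1 : Int)) c2 := by
  induction c1 generalizing k with
  | zero => simp [refSum]
  | succ c ih =>
      have h1 : c.succ + c2 = (c + c2).succ := by omega
      rw [h1]
      simp only [refSum, ih (k + 1)]
      have h2 : (k + 1) + (c : Int) = k + ((c.succ : Nat) : Int) := by push_cast; ring
      rw [h2, add_assoc]

theorem refSum_const (x n : Int) (k : Int) (c : Nat) (v : Int)
    (h : ∀ j : Int, k ≤ j → j < k + (c : Int) → gfun x n j = v) :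
    refSum x n k c = v * (c : Int) := by
  induction c generalizing k with
  | zero => simp [refSum]
  | succ c ih =>
      have hlt : k < k + ((c.succ : Nat) : Int) := by push_cast; omega
      have h0 : gfun x n k = v := h k le_rfl hlt
      have hrest : refSum x n (k + 1) c = v * (c : Int) := by
        refine ih (k + 1) (fun j h1 h2 => h j (by omega) ?_)
        push_cast at h2 ⊢
        omega
      rw [refSum, h0, hrest]
      push_cast
      ring

theorem foldl_eq_refSum (x n : Int) (c : Nat) :
    ∀ (a acc : Int),
      (PySem.List.pyRange a (a + (c : Int)) 1).foldl
        (fun rst k => if PySem.Int.floordiv x k ≥ n then rst + n else rst + PySem.Int.floordiv x k) acc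
      = acc + refSum x n a c := by
  induction c with
  | zero =>
      intro a acc
      have h : a + ((0 : Nat) : Int) = a := by push_cast; ring
      rw [h, PySem.List.pyRange_one_eq_nil le_rfl]
      simp [refSum]
  | succ c ih =>
      intro a acc
      rw [PySem.List.pyRange_one_cons (by push_cast; omega)]
      have hb : a + ((c.succ : Nat) : Int) = (a + 1) + (c : Int) := by push_cast; ring
      rw [hb]
      simp only [List.foldl_cons, ih (a + 1)]
      simp only [refSum, gfun]
      split_ifs <;> ring

-- the quotient x // j is constant and equal to x // k on the block k ≤ j ≤ e chosen by B
theorem block_bounds (x m k q e0 e : Int) (hk : 1 ≤ k) (hkm : k ≤ m)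
    (hqdef : q = PySem.Int.floordiv x k)
    (he0def : e0 = if q > 0 then PySem.Int.floordiv x q
                   else if q ≥ -1 then m
                   else PySem.Int.floordiv (-x - 1) (-q - 1))
    (hedef : e = if e0 > m then m else e0) :
    k ≤ e ∧ e ≤ m ∧ ∀ j : Int, k ≤ j → j ≤ e → PySem.Int.floordiv x j = q := by
  have hk0 : (0 : Int) < k := by omega
  have hq : q * k ≤ x ∧ x < (q + 1) * k :=
    (PySem.Int.floordiv_eq_iff_of_pos hk0).mp hqdef.symm
  have key : k ≤ e0 ∧ ∀ j : Int, k ≤ j → j ≤ e0 → PySem.Int.floordiv x j = q := by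
    by_cases hq0 : q > 0
    · have he0 : e0 = PySem.Int.floordiv x q := by rw [he0def, if_pos hq0]
      constructor
      · rw [he0, PySem.Int.le_floordiv_iff_mul_le hq0]
        nlinarith [hq.1]
      · intro j h1 h2
        have hj0 : (0 : Int) < j := by omega
        rw [PySem.Int.floordiv_eq_iff_of_pos hj0]
        rw [he0, PySem.Int.le_floordiv_iff_mul_le hq0] at h2
        constructor
        · nlinarith
        · nlinarith [hq.2]
    · by_cases hq1 : q ≥ -1
      · have he0 : e0 = m := by rw [he0def, if_neg hq0, if_pos hq1]
        refine ⟨by omega, fun j h1 h2 => ?_⟩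
        have hj0 : (0 : Int) < j := by omega
        rw [PySem.Int.floordiv_eq_iff_of_pos hj0]
        have hq01 : q = 0 ∨ q = -1 := by omega
        rcases hq01 with h | h <;> subst h
        · exact ⟨by nlinarith [hq.1], by nlinarith [hq.2]⟩
        · exact ⟨by nlinarith [hq.1], by nlinarith [hq.2]⟩
      · have hq2 : q ≤ -2 := by omega
        have hd : (0 : Int) < -q - 1 := by omega
        have he0 : e0 = PySem.Int.floordiv (-x - 1) (-q - 1) := by
          rw [he0def, if_neg hq0, if_neg hq1]
        constructor
        · rw [he0, PySem.Int.le_floordiv_iff_mul_le hd]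
          nlinarith [hq.2]
        · intro j h1 h2
          have hj0 : (0 : Int) < j := by omega
          rw [PySem.Int.floordiv_eq_iff_of_pos hj0]
          rw [he0, PySem.Int.le_floordiv_iff_mul_le hd] at h2
          constructor
          · nlinarith [hq.1]
          · nlinarith
  have hem : e ≤ m := by
    rw [hedef]; split_ifs with h <;> omega
  have hke : k ≤ e := by
    rw [hedef]; split_ifs with h <;> omega
  refine ⟨hke, hem, fun j h1 h2 => key.2 j h1 ?_⟩
  rw [hedef] at h2; revert h2; split_ifs with h <;> intro h2 <;> omega

theorem altLoop_eq_refSum (x n m : Int) :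
    ∀ (fuel : Nat) (k acc : Int), 1 ≤ k → (m + 1 - k).toNat ≤ fuel →
      altLoop x n m k fuel acc = acc + refSum x n k (m + 1 - k).toNat := by
  intro fuel
  induction fuel using Nat.strong_induction_on with
  | _ fuel ih =>
    intro k acc hk hfuel
    match fuel with
    | 0 =>
        have h0 : (m + 1 - k).toNat = 0 := by omega
        simp [altLoop, h0, refSum]
    | Nat.succ f =>
        by_cases hkm : k ≤ m
        · simp only [altLoop, if_pos hkm]
          set q := PySem.Int.floordiv x k with hqdef
          set e0 : Int :=
            if q > 0 then PySem.Int.floordiv x q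
            else if q ≥ -1 then m
            else PySem.Int.floordiv (-x - 1) (-q - 1) with he0def
          set e := if e0 > m then m else e0 with hedef
          obtain ⟨hke, hem, hconst⟩ :=
            block_bounds x m k q e0 e hk hkm hqdef he0def hedef
          have hrec := ih (f - (e - k).toNat) (by omega) (e + 1)
            (acc + (if q ≥ n then n else q) * (e - k + 1)) (by omega) (by omega)
          rw [hrec]
          have hsplit : (m + 1 - k).toNat = (e + 1 - k).toNat + (m + 1 - (e + 1)).toNat := by omega
          rw [hsplit, refSum_split]
          have hc1 : ((e + 1 - k).toNat : Int) = e + 1 - k := by omega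
          rw [hc1]
          have hconstSum : refSum x n k (e + 1 - k).toNat = (if q ≥ n then n else q) * (e + 1 - k) := by
            rw [refSum_const x n k _ (if q ≥ n then n else q)
              (fun j h1 h2 => by
                rw [hc1] at h2
                unfold gfun
                rw [hconst j h1 (by omega)]), hc1]
          rw [hconstSum]
          have hpt : k + (e + 1 - k) = e + 1 := by ring
          rw [hpt]
          ring_nf
        · have h0 : (m + 1 - k).toNat = 0 := by omega
          simp [altLoop, if_neg hkm, h0, refSum]

-- ===== VERDICT (by name: the statement is the Claim_ definition above) =====
theorem factor_seg_spec : Claim_equal_factor_seg := by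
  intro x m n _
  unfold Spec_factor_seg factor_seg factor_seg_alt
  have hB := altLoop_eq_refSum x n m m.toNat 1 0 le_rfl (by omega)
  rcases le_or_gt 1 m with hm | hm
  · have hA := foldl_eq_refSum x n m.toNat 1 0
    have hcast : (1 : Int) + (m.toNat : Int) = m + 1 := by omega
    rw [hcast] at hA
    have heq : (m + 1 - 1).toNat = m.toNat := by omega
    rw [heq] at hB
    rw [hA, hB]
  · have hnil : PySem.List.pyRange 1 (m + 1) 1 = [] := PySem.List.pyRange_one_eq_nil (by omega)
    have h0 : (m + 1 - 1).toNat = 0 := by omega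
    rw [hnil, hB, h0]
    simp [refSum]
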